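-- pv_equiv track=rewrite | github.com/Chaaany/SSafy_15_BESTTEAM | 20240816/백준/윤병찬_S2_16953_A_B.py | calc
-- ===== SOURCE A (Python) =====
-- def calc(number, target_number, calc_count):
--     if number == 0:
--         return -1
--     validate_calc1_number = (number - 1) % 10
--     validate_calc2_number = number % 2
--     calc1_number = (number - 1) // 10
--     calc2_number = number // 2
--
--     if (validate_calc1_number == 0 and target_number == calc1_number) or (validate_calc2_number == 0 and target_number == calc2_number):
--         return calc_count + 1
--
--     if validate_calc1_number == 0:
--         return calc(calc1_number, target_number, calc_count + 1)
--     elif validate_calc2_number == 0: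
--         return calc(calc2_number, target_number, calc_count + 1)
--     else:
--         return -1
-- ===== SOURCE B (Python) =====
-- def calc(number, target_number, calc_count):
--     # The two reverse ops are mutually exclusive (a number ending in 1 is odd),
--     # so simulate the forced chain with a plain loop, checking the target after each step.
--     while number != 0:
--         if (number - 1) % 10 == 0:
--             number = (number - 1) // 10
--         elif number % 2 == 0:
--             number = number // 2
--         else:
--             return -1
--         calc_count += 1
--         if number == target_number:
--             return calc_count
--     return -1
-- ===== Notes on version B (the rewrite author's own statement) =====
-- stated objective: simpler
-- what changed: Replaces the tail recursion with combined success-or-test plus three-way branch by a plain while loop over the forced chain: since the two reverse ops are mutually exclusive, one step is applied and the target is checked once after it.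
import Mathlib
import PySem

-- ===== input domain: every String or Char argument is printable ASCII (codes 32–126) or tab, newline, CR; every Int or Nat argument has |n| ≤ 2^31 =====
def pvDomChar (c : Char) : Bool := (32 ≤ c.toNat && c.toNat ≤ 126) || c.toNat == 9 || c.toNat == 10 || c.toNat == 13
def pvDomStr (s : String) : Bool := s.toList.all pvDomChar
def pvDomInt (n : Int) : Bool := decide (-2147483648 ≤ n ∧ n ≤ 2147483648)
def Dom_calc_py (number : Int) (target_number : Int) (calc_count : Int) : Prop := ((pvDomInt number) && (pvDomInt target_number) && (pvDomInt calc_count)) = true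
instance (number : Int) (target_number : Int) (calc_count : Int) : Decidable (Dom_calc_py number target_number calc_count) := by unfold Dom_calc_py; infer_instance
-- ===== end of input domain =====

-- B replaces A's tail recursion (combined success test, then prioritised branches) by a plain
-- while-loop over the forced chain, using that the two reverse ops are mutually exclusive (simpler).

-- termination lemmas, cited by the ports' decreasing_by
theorem pv_c1_lt (number : Int) (_h0 : number ≠ 0)
    (h : PySem.Int.mod (number - 1) 10 = 0) :
    (PySem.Int.floordiv (number - 1) 10).natAbs < number.natAbs := by
  rw [PySem.Int.mod_eq_emod_of_pos (by norm_num)] at h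
  rw [PySem.Int.floordiv_eq_ediv_of_pos (by norm_num)]
  omega

theorem pv_c2_lt (number : Int) (h0 : number ≠ 0)
    (h : PySem.Int.mod number 2 = 0) :
    (PySem.Int.floordiv number 2).natAbs < number.natAbs := by
  rw [PySem.Int.mod_eq_emod_of_pos (by norm_num)] at h
  rw [PySem.Int.floordiv_eq_ediv_of_pos (by norm_num)]
  omega

-- ===== PORT A =====
def calc_py (number : Int) (target_number : Int) (calc_count : Int) : Int :=
  if h0 : number = 0 then -1
  else
    if (PySem.Int.mod (number - 1) 10 = 0 ∧ target_number = PySem.Int.floordiv (number - 1) 10)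
       ∨ (PySem.Int.mod number 2 = 0 ∧ target_number = PySem.Int.floordiv number 2) then
      calc_count + 1
    else if h1 : PySem.Int.mod (number - 1) 10 = 0 then
      calc_py (PySem.Int.floordiv (number - 1) 10) target_number (calc_count + 1)
    else if h2 : PySem.Int.mod number 2 = 0 then
      calc_py (PySem.Int.floordiv number 2) target_number (calc_count + 1)
    else -1
termination_by number.natAbs
decreasing_by
  · exact pv_c1_lt number h0 h1
  · exact pv_c2_lt number h0 h2

-- ===== PORT B =====
-- the while-loop of Source B: state = (number, calc_count)
def calc_loop (number : Int) (target_number : Int) (calc_count : Int) : Int :=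
  if h0 : number = 0 then -1
  else if h1 : PySem.Int.mod (number - 1) 10 = 0 then
    let n := PySem.Int.floordiv (number - 1) 10
    let c := calc_count + 1
    if n = target_number then c else calc_loop n target_number c
  else if h2 : PySem.Int.mod number 2 = 0 then
    let n := PySem.Int.floordiv number 2
    let c := calc_count + 1
    if n = target_number then c else calc_loop n target_number c
  else -1
termination_by number.natAbs
decreasing_by
  · exact pv_c1_lt number h0 h1
  · exact pv_c2_lt number h0 h2

def calc_py_alt (number : Int) (target_number : Int) (calc_count : Int) : Int :=
  calc_loop number target_number calc_count

-- ===== PRECONDITION & SPEC =====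
def Spec_calc_py (number : Int) (target_number : Int) (calc_count : Int) (out : Int) : Prop := out = calc_py_alt number target_number calc_count
instance (number : Int) (target_number : Int) (calc_count : Int) (out : Int) : Decidable (Spec_calc_py number target_number calc_count out) := by unfold Spec_calc_py; infer_instance

-- ===== CLAIM (what is proved, stated in full; the proofs are below) =====
def Claim_equal_calc_py : Prop := ∀ (number : Int) (target_number : Int) (calc_count : Int), Dom_calc_py number target_number calc_count → Spec_calc_py number target_number calc_count (calc_py number target_number calc_count)

-- ===== LEMMAS AND PROOFS =====

-- a number ending in digit 1 is odd: the two ops exclude each other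
theorem pv_excl (number : Int) (h : PySem.Int.mod (number - 1) 10 = 0) :
    PySem.Int.mod number 2 ≠ 0 := by
  rw [PySem.Int.mod_eq_emod_of_pos (by norm_num)] at h
  rw [PySem.Int.mod_eq_emod_of_pos (by norm_num)]
  omega

theorem pv_eq (target_number : Int) : ∀ (number calc_count : Int),
    calc_py number target_number calc_count = calc_loop number target_number calc_count := by
  refine calc_py.induct target_number
    (motive := fun n c => calc_py n target_number c = calc_loop n target_number c) ?_ ?_ ?_ ?_ ?_
  · intro calc_count
    rw [calc_py, calc_loop]; simp
  · intro number calc_count h0 hsucc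
    have e1 : PySem.Int.floordiv (number - 1) 10 = (number - 1) / 10 :=
      PySem.Int.floordiv_eq_ediv_of_pos (by norm_num)
    have e2 : PySem.Int.floordiv number 2 = number / 2 :=
      PySem.Int.floordiv_eq_ediv_of_pos (by norm_num)
    rw [calc_py, calc_loop]
    rcases hsucc with ⟨h1, ht⟩ | ⟨h2, ht⟩
    · have hd1 : (10 : Int) ∣ number - 1 := (PySem.Int.mod_eq_zero_iff_dvd _ _).mp h1
      have ht' : target_number = (number - 1) / 10 := e1 ▸ ht
      simp [h0, hd1, ht']
    · have h1 : PySem.Int.mod (number - 1) 10 ≠ 0 := fun h => pv_excl number h h2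
      have hnd1 : ¬ (10 : Int) ∣ number - 1 := fun hd => h1 ((PySem.Int.mod_eq_zero_iff_dvd _ _).mpr hd)
      have hd2 : (2 : Int) ∣ number := (PySem.Int.mod_eq_zero_iff_dvd _ _).mp h2
      have ht' : target_number = number / 2 := e2 ▸ ht
      simp [h0, hnd1, hd2, ht']
  · intro number calc_count h0 hsucc h1 ih
    have e1 : PySem.Int.floordiv (number - 1) 10 = (number - 1) / 10 :=
      PySem.Int.floordiv_eq_ediv_of_pos (by norm_num)
    rw [calc_py, calc_loop]
    have hd1 : (10 : Int) ∣ number - 1 := (PySem.Int.mod_eq_zero_iff_dvd _ _).mp h1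
    have hnd2 : ¬ (2 : Int) ∣ number := fun hd =>
      pv_excl number h1 ((PySem.Int.mod_eq_zero_iff_dvd _ _).mpr hd)
    have hne : target_number ≠ (number - 1) / 10 := fun h => hsucc (Or.inl ⟨h1, e1.symm ▸ h⟩)
    have hne' : (number - 1) / 10 ≠ target_number := Ne.symm hne
    rw [e1] at ih
    simp [h0, hd1, hnd2, hne, hne', ih]
  · intro number calc_count h0 hsucc h1 h2 ih
    have e2 : PySem.Int.floordiv number 2 = number / 2 :=
      PySem.Int.floordiv_eq_ediv_of_pos (by norm_num)
    rw [calc_py, calc_loop]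
    have hnd1 : ¬ (10 : Int) ∣ number - 1 := fun hd => h1 ((PySem.Int.mod_eq_zero_iff_dvd _ _).mpr hd)
    have hd2 : (2 : Int) ∣ number := (PySem.Int.mod_eq_zero_iff_dvd _ _).mp h2
    have hne : target_number ≠ number / 2 := fun h => hsucc (Or.inr ⟨h2, e2.symm ▸ h⟩)
    have hne' : number / 2 ≠ target_number := Ne.symm hne
    rw [e2] at ih
    simp [h0, hnd1, hd2, hne, hne', ih]
  · intro number calc_count h0 hsucc h1 h2
    rw [calc_py, calc_loop]
    have hnd1 : ¬ (10 : Int) ∣ number - 1 := fun hd => h1 ((PySem.Int.mod_eq_zero_iff_dvd _ _).mpr hd)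
    have hnd2 : ¬ (2 : Int) ∣ number := fun hd => h2 ((PySem.Int.mod_eq_zero_iff_dvd _ _).mpr hd)
    simp [h0, hnd1, hnd2]

-- ===== VERDICT (by name: the statement is the Claim_ definition above) =====
theorem calc_py_spec : Claim_equal_calc_py := by
  intro number target_number calc_count _
  unfold Spec_calc_py calc_py_alt
  exact pv_eq target_number number calc_count
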